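-- pv_equiv track=rewrite | github.com/wdong97/web-forum-research-sentiment-analysis | src/market_research_pipeline/reports.py | render_pricing_notes
-- ===== SOURCE A (Python) =====
-- from collections import Counter, defaultdict
--
-- def render_pricing_notes(posts: list[dict]) -> str:
--     wtp_counts = Counter(post.get("willingness_to_pay_score", 0) for post in posts)
--     lines = [
--         "# Pricing And Economics Notes",
--         "",
--         "This first pass is based on willingness-to-pay signals inferred from public discussion, not direct pricing interviews.",
--         "",
--         "## Signal Distribution",
--         "",
--     ]
--     for score, count in sorted(wtp_counts.items(), reverse=True):
--         lines.append(f"- WTP score {score}: {count} posts")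
--     lines.extend(
--         [
--             "",
--             "## Interpretation",
--             "",
--             "- Small-team operator discussion tends to support the strongest monetizable wedge because the pain maps more cleanly to saved time and coordination.",
--             "- Second-brain power users show strong fit and recurring need, but some of that demand may remain hobbyist or tool-curious unless the workflow is obvious quickly.",
--             "- Creator demand looks promising as a differentiated workflow wedge, but pricing proof likely needs real pilot usage rather than broad public sentiment alone.",
--             "",
--             "## Current Pricing Hypothesis",
--             "",
--             "- B2C workflow SKU: roughly low-teens per month if the first job is obvious and reviewable",
--             "- Prosumer/power tier: higher if ingestion volume, richer models, or premium workflows are included",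
--             "- Small-team pilot: separate pilot pricing tied to clarity, follow-through, and time saved",
--         ]
--     )
--     return "\n".join(lines) + "\n"
-- ===== SOURCE B (Python) =====
-- _HEAD = (
--     "# Pricing And Economics Notes\n"
--     "\n"
--     "This first pass is based on willingness-to-pay signals inferred from public discussion, not direct pricing interviews.\n"
--     "\n"
--     "## Signal Distribution\n"
--     "\n"
-- )
--
-- _TAIL = (
--     "\n"
--     "## Interpretation\n"
--     "\n"
--     "- Small-team operator discussion tends to support the strongest monetizable wedge because the pain maps more cleanly to saved time and coordination.\n"
--     "- Second-brain power users show strong fit and recurring need, but some of that demand may remain hobbyist or tool-curious unless the workflow is obvious quickly.\n"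
--     "- Creator demand looks promising as a differentiated workflow wedge, but pricing proof likely needs real pilot usage rather than broad public sentiment alone.\n"
--     "\n"
--     "## Current Pricing Hypothesis\n"
--     "\n"
--     "- B2C workflow SKU: roughly low-teens per month if the first job is obvious and reviewable\n"
--     "- Prosumer/power tier: higher if ingestion volume, richer models, or premium workflows are included\n"
--     "- Small-team pilot: separate pilot pricing tied to clarity, follow-through, and time saved\n"
-- )
--
--
-- def render_pricing_notes(posts: list[dict]) -> str:
--     # Sort-then-group: sort scores descending, then one linear scan over runs
--     # of equal scores; no hash-based counting at all.
--     scores = sorted(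
--         (post.get("willingness_to_pay_score", 0) for post in posts), reverse=True
--     )
--     parts = [_HEAD]
--     i = 0
--     n = len(scores)
--     while i < n:
--         j = i
--         while j < n and scores[j] == scores[i]:
--             j += 1
--         parts.append(f"- WTP score {scores[i]}: {j - i} posts\n")
--         i = j
--     parts.append(_TAIL)
--     return "".join(parts)
-- ===== Notes on version B (the rewrite author's own statement) =====
-- stated objective: alternative
-- what changed: Replaces hash-based counting (Counter) plus sorting the (score,count) pairs and joining a line list by a sort-then-group pass: sort the raw score list descending once, then a single linear two-pointer scan over runs of equal scores emits each distribution line, concatenated between one static head and tail string.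
import Mathlib
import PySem

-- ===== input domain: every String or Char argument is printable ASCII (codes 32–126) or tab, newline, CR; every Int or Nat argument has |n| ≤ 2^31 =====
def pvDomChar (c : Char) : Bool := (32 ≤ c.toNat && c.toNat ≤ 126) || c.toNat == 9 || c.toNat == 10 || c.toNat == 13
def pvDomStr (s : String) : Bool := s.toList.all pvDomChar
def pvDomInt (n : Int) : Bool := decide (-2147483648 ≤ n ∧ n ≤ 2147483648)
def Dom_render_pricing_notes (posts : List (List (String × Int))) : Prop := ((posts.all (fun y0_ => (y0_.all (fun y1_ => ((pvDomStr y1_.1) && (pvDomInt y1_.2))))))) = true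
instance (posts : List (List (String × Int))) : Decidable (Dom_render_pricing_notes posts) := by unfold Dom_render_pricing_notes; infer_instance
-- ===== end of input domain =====

-- B replaces Counter-based hash counting + sorting (score,count) pairs + line-list join by
-- sort-then-group: sort the score list descending, one linear run scan emits the lines
-- between a static head and tail string; same return value, objective: alternative.

-- ===== PORT A =====
def render_pricing_notes (posts : List (List (String × Int))) : String :=
  let wtp_counts := PySem.Dict.counter
    (posts.map (fun post => PySem.Dict.getD (PySem.Dict.mk post) "willingness_to_pay_score" 0))
  let lines : List String :=
    [ "# Pricing And Economics Notes",
      "",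
      "This first pass is based on willingness-to-pay signals inferred from public discussion, not direct pricing interviews.",
      "",
      "## Signal Distribution",
      "" ]
  let lines := (PySem.List.sorted2 wtp_counts.items Prod.fst Prod.snd true).foldl
    (fun ls sc => ls ++ ["- WTP score " ++ PySem.Int.toStr sc.1 ++ ": " ++ PySem.Int.toStr sc.2 ++ " posts"])
    lines
  let lines := lines ++
    [ "",
      "## Interpretation",
      "",
      "- Small-team operator discussion tends to support the strongest monetizable wedge because the pain maps more cleanly to saved time and coordination.",
      "- Second-brain power users show strong fit and recurring need, but some of that demand may remain hobbyist or tool-curious unless the workflow is obvious quickly.",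
      "- Creator demand looks promising as a differentiated workflow wedge, but pricing proof likely needs real pilot usage rather than broad public sentiment alone.",
      "",
      "## Current Pricing Hypothesis",
      "",
      "- B2C workflow SKU: roughly low-teens per month if the first job is obvious and reviewable",
      "- Prosumer/power tier: higher if ingestion volume, richer models, or premium workflows are included",
      "- Small-team pilot: separate pilot pricing tied to clarity, follow-through, and time saved" ]
  PySem.Str.join "\n" lines ++ "\n"

-- ===== PORT B =====
def pvHead : String :=
  "# Pricing And Economics Notes
"
  ++ "
"
  ++ "This first pass is based on willingness-to-pay signals inferred from public discussion, not direct pricing interviews.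
"
  ++ "
"
  ++ "## Signal Distribution
"
  ++ "
"

def pvTail : String :=
  "
"
  ++ "## Interpretation
"
  ++ "
"
  ++ "- Small-team operator discussion tends to support the strongest monetizable wedge because the pain maps more cleanly to saved time and coordination.
"
  ++ "- Second-brain power users show strong fit and recurring need, but some of that demand may remain hobbyist or tool-curious unless the workflow is obvious quickly.
"
  ++ "- Creator demand looks promising as a differentiated workflow wedge, but pricing proof likely needs real pilot usage rather than broad public sentiment alone.
"
  ++ "
"
  ++ "## Current Pricing Hypothesis
"
  ++ "
"
  ++ "- B2C workflow SKU: roughly low-teens per month if the first job is obvious and reviewable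
"
  ++ "- Prosumer/power tier: higher if ingestion volume, richer models, or premium workflows are included
"
  ++ "- Small-team pilot: separate pilot pricing tied to clarity, follow-through, and time saved
"

-- the two-pointer run scan of Source B: the inner while advances j over the run of scores
-- equal to scores[i] (= takeWhile here), emits one line with the run length, and the
-- outer loop resumes at j (= dropWhile here)
def pvRuns : List Int → List String
  | [] => []
  | x :: xs =>
      ("- WTP score " ++ PySem.Int.toStr x ++ ": "
        ++ PySem.Int.toStr (((xs.takeWhile (fun y => y == x)).length + 1 : Nat) : Int)
        ++ " posts\n")
        :: pvRuns (xs.dropWhile (fun y => y == x))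
termination_by ys => ys.length
decreasing_by
  exact Nat.lt_succ_of_le (List.length_dropWhile_le _ _)

def render_pricing_notes_alt (posts : List (List (String × Int))) : String :=
  let scores := PySem.List.sorted
    (posts.map (fun post => PySem.Dict.getD (PySem.Dict.mk post) "willingness_to_pay_score" 0))
    (fun s => s) true
  pvHead ++ PySem.Str.join "" (pvRuns scores) ++ pvTail

-- ===== PRECONDITION & SPEC =====
def Spec_render_pricing_notes (posts : List (List (String × Int))) (out : String) : Prop := out = render_pricing_notes_alt posts
instance (posts : List (List (String × Int))) (out : String) : Decidable (Spec_render_pricing_notes posts out) := by unfold Spec_render_pricing_notes; infer_instance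

-- ===== CLAIM (what is proved, stated in full; the proofs are below) =====
def Claim_equal_render_pricing_notes : Prop := ∀ (posts : List (List (String × Int))), Dom_render_pricing_notes posts → Spec_render_pricing_notes posts (render_pricing_notes posts)

-- ===== LEMMAS AND PROOFS =====

lemma pv_insertBy_congr {α : Type} (b1 b2 : α → α → Bool) (x : α) :
    ∀ ys : List α, (∀ y ∈ ys, b1 x y = b2 x y) →
      PySem.List.insertBy b1 x ys = PySem.List.insertBy b2 x ys := by
  intro ys
  induction ys with
  | nil => intro _; rfl
  | cons y ys ih =>
      intro h
      simp only [PySem.List.insertBy]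
      rw [h y (by simp)]
      by_cases hb : b2 x y = true
      · simp [hb]
      · simp only [Bool.not_eq_true] at hb
        simp [hb, ih (fun z hz => h z (by simp [hz]))]

lemma pv_foldl_insertBy_congr {α : Type} (b1 b2 : α → α → Bool) (P : α → Prop)
    (H : ∀ a b, P a → P b → b1 a b = b2 a b) :
    ∀ (xs acc : List α), (∀ x ∈ xs, P x) → (∀ x ∈ acc, P x) →
      xs.foldl (fun acc x => PySem.List.insertBy b1 x acc) acc
        = xs.foldl (fun acc x => PySem.List.insertBy b2 x acc) acc := by
  intro xs
  induction xs with
  | nil => intro acc _ _; rfl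
  | cons x xs ih =>
      intro acc hxs hacc
      simp only [List.foldl_cons]
      rw [pv_insertBy_congr b1 b2 x acc (fun y hy => H x y (hxs x (by simp)) (hacc y hy))]
      apply ih
      · intro z hz; exact hxs z (by simp [hz])
      · intro z hz
        rcases (PySem.List.mem_insertBy b2 x z acc).1 hz with h | h
        · exact h ▸ hxs x (by simp)
        · exact hacc z h

lemma pv_sorted2_eq (ps : List (Int × Int))
    (h : ∀ a ∈ ps, ∀ b ∈ ps, a.1 = b.1 → a = b) :
    PySem.List.sorted2 ps Prod.fst Prod.snd true = PySem.List.sorted ps Prod.fst true := by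
  simp only [PySem.List.sorted2, PySem.List.sorted]
  apply pv_foldl_insertBy_congr _ _ (· ∈ ps) ?_ ps [] (fun _ hx => hx) (by simp)
  intro a b ha hb
  rcases lt_trichotomy a.1 b.1 with hlt | heq | hgt
  · simp [hlt, not_lt_of_gt hlt]
  · have : a = b := h a ha b hb heq
    subst this
    simp
  · simp [hgt, not_lt_of_gt hgt]

-- the descending sort of the distinct scores is strictly decreasing
lemma pv_ds_pairwise_gt (xs : List Int) :
    (PySem.List.sorted (PySem.Set.ofList xs) (fun s => s) true).Pairwise (fun a b => b < a) := by
  have hnd : (PySem.List.sorted (PySem.Set.ofList xs) (fun s => s) true).Nodup :=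
    (PySem.List.sorted_perm (PySem.Set.ofList xs) (fun s => s) true).nodup_iff.mpr
      (PySem.Set.nodup_ofList xs)
  have hle := PySem.List.sorted_pairwise_rev (PySem.Set.ofList xs) (fun s => s)
  exact (hle.and hnd).imp (fun hab => lt_of_le_of_ne hab.1 (fun hba => hab.2 hba.symm))

-- A's sorted counter items are the sorted distinct scores paired with their counts
lemma pv_sorted_items (xs : List Int) :
    PySem.List.sorted2 (PySem.Dict.counter xs).items Prod.fst Prod.snd true
      = (PySem.List.sorted (PySem.Set.ofList xs) (fun s => s) true).map
          (fun k => (k, (xs.count k : Int))) := by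
  rw [PySem.Dict.items_counter]
  rw [pv_sorted2_eq]
  · apply PySem.List.sorted_rev_eq_of_perm_of_pairwise_gt
    · exact (PySem.List.sorted_perm (PySem.Set.ofList xs) (fun s => s) true).map _
    · rw [List.pairwise_map]
      exact pv_ds_pairwise_gt xs
  · intro a ha b hb hab
    simp only [List.mem_map] at ha hb
    obtain ⟨k1, _, rfl⟩ := ha
    obtain ⟨k2, _, rfl⟩ := hb
    simp only at hab
    simp [hab]

-- proof-only skeleton of pvRuns: the run heads (the distinct scores, in scan order)
def pvKeys : List Int → List Int
  | [] => []
  | x :: xs => x :: pvKeys (xs.dropWhile (fun y => y == x))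
termination_by ys => ys.length
decreasing_by
  exact Nat.lt_succ_of_le (List.length_dropWhile_le _ _)

lemma pv_mem_pvKeys (ys : List Int) : ∀ k, k ∈ pvKeys ys ↔ k ∈ ys := by
  match ys with
  | [] => simp [pvKeys]
  | x :: xs =>
      intro k
      have ih := pv_mem_pvKeys (xs.dropWhile (fun y => y == x)) k
      constructor
      · intro hk
        rcases (by simpa [pvKeys] using hk : k = x ∨ k ∈ pvKeys (xs.dropWhile (fun y => y == x))) with rfl | hk
        · simp
        · have : k ∈ xs := List.Sublist.mem (ih.1 hk) (List.dropWhile_sublist _)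
          simp [this]
      · intro hk
        rcases (by simpa using hk : k = x ∨ k ∈ xs) with rfl | hk
        · simp [pvKeys]
        · rw [← List.takeWhile_append_dropWhile (p := fun y => y == x) (l := xs)] at hk
          rcases List.mem_append.1 hk with hk | hk
          · have : (k == x) = true := List.mem_takeWhile_imp (p := fun y => y == x) hk
            simp [pvKeys, (by simpa using this : k = x)]
          · simp [pvKeys, ih.2 hk]
termination_by ys.length
decreasing_by
  exact Nat.lt_succ_of_le (List.length_dropWhile_le _ _)

-- in a descending-sorted list, everything after the first run is strictly smaller
lemma pv_drop_lt (x : Int) (xs : List Int)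
    (hx : ∀ z ∈ xs, z ≤ x) (hp : xs.Pairwise (fun a b => b ≤ a)) :
    ∀ y ∈ xs.dropWhile (fun y => y == x), y < x := by
  induction xs with
  | nil => simp
  | cons z zs ih =>
      by_cases hz : (z == x) = true
      · rw [List.dropWhile_cons, if_pos hz]
        exact ih (fun w hw => hx w (by simp [hw])) hp.tail
      · rw [List.dropWhile_cons, if_neg hz]
        have hzx : z < x :=
          lt_of_le_of_ne (hx z (by simp)) (by simpa using hz)
        intro y hy
        rcases (by simpa using hy : y = z ∨ y ∈ zs) with rfl | hy
        · exact hzx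
        · exact lt_of_le_of_lt (List.rel_of_pairwise_cons hp hy) hzx

lemma pv_pvKeys_pairwise (ys : List Int) (h : ys.Pairwise (fun a b => b ≤ a)) :
    (pvKeys ys).Pairwise (fun a b => b < a) := by
  match ys with
  | [] => simp [pvKeys]
  | x :: xs =>
      have hx : ∀ z ∈ xs, z ≤ x := fun z hz => List.rel_of_pairwise_cons h hz
      have hdrop := pv_drop_lt x xs hx h.tail
      have hpd : (xs.dropWhile (fun y => y == x)).Pairwise (fun a b => b ≤ a) :=
        h.tail.sublist (List.dropWhile_sublist _)
      have ih := pv_pvKeys_pairwise (xs.dropWhile (fun y => y == x)) hpd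
      simp only [pvKeys]
      exact List.Pairwise.cons
        (fun k hk => hdrop k ((pv_mem_pvKeys _ k).1 hk)) ih
termination_by ys.length
decreasing_by
  exact Nat.lt_succ_of_le (List.length_dropWhile_le _ _)

-- the run scan over a descending-sorted list produces, per distinct score, its total count
lemma pv_runs_eq (ys : List Int) (h : ys.Pairwise (fun a b => b ≤ a)) :
    pvRuns ys = (pvKeys ys).map (fun k =>
      "- WTP score " ++ PySem.Int.toStr k ++ ": "
        ++ PySem.Int.toStr ((ys.count k : Nat) : Int) ++ " posts\n") := by
  match ys with
  | [] => simp [pvRuns, pvKeys]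
  | x :: xs =>
      have hx : ∀ z ∈ xs, z ≤ x := fun z hz => List.rel_of_pairwise_cons h hz
      have hdrop := pv_drop_lt x xs hx h.tail
      have hpd : (xs.dropWhile (fun y => y == x)).Pairwise (fun a b => b ≤ a) :=
        h.tail.sublist (List.dropWhile_sublist _)
      have ih := pv_runs_eq (xs.dropWhile (fun y => y == x)) hpd
      have hxs : xs = xs.takeWhile (fun y => y == x) ++ xs.dropWhile (fun y => y == x) :=
        (List.takeWhile_append_dropWhile ..).symm
      have htake : ∀ y ∈ xs.takeWhile (fun y => y == x), y = x := by
        intro y hy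
        simpa using (List.mem_takeWhile_imp (p := fun y => y == x) hy : (y == x) = true)
      -- the head's count is the first run's length plus one
      have hcx : (x :: xs).count x = (xs.takeWhile (fun y => y == x)).length + 1 := by
        rw [List.count_cons_self]
        conv_lhs => rw [hxs]
        rw [List.count_append]
        have h1 : (xs.takeWhile (fun y => y == x)).count x
            = (xs.takeWhile (fun y => y == x)).length :=
          List.count_eq_length.2 (fun y hy => by simp [htake y hy])
        have h2 : (xs.dropWhile (fun y => y == x)).count x = 0 :=
          List.count_eq_zero.2 (fun hm => lt_irrefl x (hdrop x hm))
        omega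
      -- later keys do not occur in the first run
      have hck : ∀ k ∈ pvKeys (xs.dropWhile (fun y => y == x)),
          (x :: xs).count k = (xs.dropWhile (fun y => y == x)).count k := by
        intro k hk
        have hklt : k < x := hdrop k ((pv_mem_pvKeys _ k).1 hk)
        have h1 : (xs.takeWhile (fun y => y == x)).count k = 0 :=
          List.count_eq_zero.2 (fun hm => absurd (htake k hm) (ne_of_lt hklt))
        rw [List.count_cons_of_ne hklt.ne']
        conv_lhs => rw [hxs]
        rw [List.count_append, h1]
        omega
      simp only [pvRuns, pvKeys, List.map_cons]
      refine congrArg₂ _ ?_ ?_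
      · rw [hcx]
      · rw [ih]
        exact (List.map_congr_left (fun k hk => by rw [hck k hk])).symm
termination_by ys.length
decreasing_by
  exact Nat.lt_succ_of_le (List.length_dropWhile_le _ _)

-- the run heads of the descending-sorted score list are exactly sorted(set(scores), reverse=True)
lemma pv_keys_sorted (scores : List Int) :
    pvKeys (PySem.List.sorted scores (fun s => s) true)
      = PySem.List.sorted (PySem.Set.ofList scores) (fun s => s) true := by
  have h := PySem.List.sorted_pairwise_rev scores (fun s => s)
  have hgt := pv_pvKeys_pairwise _ h
  have hnd : (pvKeys (PySem.List.sorted scores (fun s => s) true)).Nodup :=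
    hgt.imp (fun hab => (ne_of_lt hab).symm)
  symm
  apply PySem.List.sorted_rev_eq_of_perm_of_pairwise_gt
  · refine (List.perm_ext_iff_of_nodup hnd (PySem.Set.nodup_ofList scores)).2 ?_
    intro k
    rw [pv_mem_pvKeys, PySem.List.mem_sorted, PySem.Set.mem_ofList]
  · exact hgt

set_option maxRecDepth 100000
set_option maxHeartbeats 2000000

-- String-level join algebra (kept symbolic: no big literal is ever unfolded to chars)
lemma pv_sapp_assoc (a b c : String) : a ++ b ++ c = a ++ (b ++ c) := by
  rw [← String.toList_inj]
  simp [List.append_assoc]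

lemma pv_empty_append (s : String) : "" ++ s = s := by
  rw [← String.toList_inj]
  simp

lemma pv_sj_cons (sep x : String) (l : List String) (h : l ≠ []) :
    PySem.Str.join sep (x :: l) = x ++ sep ++ PySem.Str.join sep l := by
  cases l with
  | nil => exact absurd rfl h
  | cons q r =>
      rw [← String.toList_inj]
      simp [PySem.Str.toList_join, PySem.Chars.join_cons_cons]

lemma pv_sj_singleton (sep x : String) : PySem.Str.join sep [x] = x := by
  rw [← String.toList_inj]
  simp [PySem.Str.toList_join, PySem.Chars.join_singleton]

lemma pv_sj0_cons (x : String) (l : List String) :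
    PySem.Str.join "" (x :: l) = x ++ PySem.Str.join "" l := by
  cases l with
  | nil =>
      rw [← String.toList_inj]
      simp [PySem.Str.toList_join, PySem.Chars.join_singleton, PySem.Chars.join_nil,
        show ("" : String).toList = [] from rfl]
  | cons q r =>
      rw [← String.toList_inj]
      simp [PySem.Str.toList_join, PySem.Chars.join_cons_cons]

lemma pv_sj_mid (tl : List String) (htl : tl ≠ []) :
    ∀ mid : List String,
      PySem.Str.join "\n" (mid ++ tl)
        = PySem.Str.join "" (mid.map (· ++ "\n")) ++ PySem.Str.join "\n" tl := by
  intro mid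
  induction mid with
  | nil =>
      simp [show PySem.Str.join "" ([] : List String) = "" from rfl]
  | cons x mid ih =>
      have hne : mid ++ tl ≠ [] := by
        cases mid <;> simp [htl]
      rw [List.cons_append, pv_sj_cons _ _ _ hne, ih, List.map_cons, pv_sj0_cons]
      simp [pv_sapp_assoc]

lemma pv_assemble (mid : List String) :
    PySem.Str.join "\n"
        (["# Pricing And Economics Notes",
          "",
          "This first pass is based on willingness-to-pay signals inferred from public discussion, not direct pricing interviews.",
          "",
          "## Signal Distribution",
          ""] ++ mid ++
         ["",
          "## Interpretation",
          "",
          "- Small-team operator discussion tends to support the strongest monetizable wedge because the pain maps more cleanly to saved time and coordination.",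
          "- Second-brain power users show strong fit and recurring need, but some of that demand may remain hobbyist or tool-curious unless the workflow is obvious quickly.",
          "- Creator demand looks promising as a differentiated workflow wedge, but pricing proof likely needs real pilot usage rather than broad public sentiment alone.",
          "",
          "## Current Pricing Hypothesis",
          "",
          "- B2C workflow SKU: roughly low-teens per month if the first job is obvious and reviewable",
          "- Prosumer/power tier: higher if ingestion volume, richer models, or premium workflows are included",
          "- Small-team pilot: separate pilot pricing tied to clarity, follow-through, and time saved"]) ++ "\n"
      = pvHead ++ PySem.Str.join "" (mid.map (· ++ "\n")) ++ pvTail := by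
  have e1 : ("# Pricing And Economics Notes\n" : String) = "# Pricing And Economics Notes" ++ "\n" := rfl
  have e2 : ("This first pass is based on willingness-to-pay signals inferred from public discussion, not direct pricing interviews.\n" : String) = "This first pass is based on willingness-to-pay signals inferred from public discussion, not direct pricing interviews." ++ "\n" := rfl
  have e3 : ("## Signal Distribution\n" : String) = "## Signal Distribution" ++ "\n" := rfl
  have e4 : ("## Interpretation\n" : String) = "## Interpretation" ++ "\n" := rfl
  have e5 : ("- Small-team operator discussion tends to support the strongest monetizable wedge because the pain maps more cleanly to saved time and coordination.\n" : String) = "- Small-team operator discussion tends to support the strongest monetizable wedge because the pain maps more cleanly to saved time and coordination." ++ "\n" := rfl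
  have e6 : ("- Second-brain power users show strong fit and recurring need, but some of that demand may remain hobbyist or tool-curious unless the workflow is obvious quickly.\n" : String) = "- Second-brain power users show strong fit and recurring need, but some of that demand may remain hobbyist or tool-curious unless the workflow is obvious quickly." ++ "\n" := rfl
  have e7 : ("- Creator demand looks promising as a differentiated workflow wedge, but pricing proof likely needs real pilot usage rather than broad public sentiment alone.\n" : String) = "- Creator demand looks promising as a differentiated workflow wedge, but pricing proof likely needs real pilot usage rather than broad public sentiment alone." ++ "\n" := rfl
  have e8 : ("## Current Pricing Hypothesis\n" : String) = "## Current Pricing Hypothesis" ++ "\n" := rfl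
  have e9 : ("- B2C workflow SKU: roughly low-teens per month if the first job is obvious and reviewable\n" : String) = "- B2C workflow SKU: roughly low-teens per month if the first job is obvious and reviewable" ++ "\n" := rfl
  have e10 : ("- Prosumer/power tier: higher if ingestion volume, richer models, or premium workflows are included\n" : String) = "- Prosumer/power tier: higher if ingestion volume, richer models, or premium workflows are included" ++ "\n" := rfl
  have e11 : ("- Small-team pilot: separate pilot pricing tied to clarity, follow-through, and time saved\n" : String) = "- Small-team pilot: separate pilot pricing tied to clarity, follow-through, and time saved" ++ "\n" := rfl
  simp only [List.cons_append, List.nil_append]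
  rw [pv_sj_cons _ _ _ (by simp), pv_sj_cons _ _ _ (by simp),
      pv_sj_cons _ _ _ (by simp), pv_sj_cons _ _ _ (by simp),
      pv_sj_cons _ _ _ (by simp), pv_sj_cons _ _ _ (by simp),
      pv_sj_mid _ (by simp)]
  rw [pv_sj_cons _ _ _ (by simp), pv_sj_cons _ _ _ (by simp),
      pv_sj_cons _ _ _ (by simp), pv_sj_cons _ _ _ (by simp),
      pv_sj_cons _ _ _ (by simp), pv_sj_cons _ _ _ (by simp),
      pv_sj_cons _ _ _ (by simp), pv_sj_cons _ _ _ (by simp),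
      pv_sj_cons _ _ _ (by simp), pv_sj_cons _ _ _ (by simp),
      pv_sj_cons _ _ _ (by simp), pv_sj_singleton]
  simp only [pvHead, pvTail, e1, e2, e3, e4, e5, e6, e7, e8, e9, e10, e11,
    pv_sapp_assoc, pv_empty_append]

theorem pv_main : ∀ (posts : List (List (String × Int))),
    render_pricing_notes posts = render_pricing_notes_alt posts := by
  intro posts
  simp only [render_pricing_notes, render_pricing_notes_alt,
    PySem.List.foldl_append_singleton_eq_map, pv_sorted_items, List.map_map]
  rw [pv_assemble]
  rw [pv_runs_eq _ (PySem.List.sorted_pairwise_rev _ (fun s => s)), pv_keys_sorted]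
  have hp : (" posts\n" : String) = " posts" ++ "\n" := rfl
  simp only [List.map_map, Function.comp_def]
  congr 1
  congr 1
  congr 1
  apply List.map_congr_left
  intro k _
  rw [(PySem.List.sorted_perm _ (fun s => s) true).count_eq]
  simp [pv_sapp_assoc, hp]

-- ===== VERDICT (by name: the statement is the Claim_ definition above) =====
theorem render_pricing_notes_spec : Claim_equal_render_pricing_notes := by
  intro posts _
  unfold Spec_render_pricing_notes
  exact pv_main posts
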